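-- pv_equiv track=rewrite | github.com/LarkinOhern/msr-simulation | build_msr_tape.py | dq_stats
-- ===== SOURCE A (Python) =====
-- def dq_stats(loans, upb_field):
--     active = [ln for ln in loans if ln.get(upb_field) is not None]
--     n = len(active)
--     sf = "status_dec" if upb_field == "upb_dec" else "status_jan"
--     s30  = sum(1 for ln in active if ln.get(sf) == "30 DPD")
--     s60  = sum(1 for ln in active if ln.get(sf) == "60 DPD")
--     s90  = sum(1 for ln in active if ln.get(sf) == "90+ DPD")
--     scur = n - s30 - s60 - s90
--     return n, scur, s30, s60, s90
-- ===== SOURCE B (Python) =====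
-- def dq_stats(loans, upb_field):
--     sf = "status_dec" if upb_field == "upb_dec" else "status_jan"
--     n = 0
--     tally = {}
--     for ln in loans:
--         if ln.get(upb_field) is None:
--             continue
--         n += 1
--         st = ln.get(sf)
--         tally[st] = tally.get(st, 0) + 1
--     s30 = tally.get("30 DPD", 0)
--     s60 = tally.get("60 DPD", 0)
--     s90 = tally.get("90+ DPD", 0)
--     return n, n - s30 - s60 - s90, s30, s60, s90
-- ===== Notes on version B (the rewrite author's own statement) =====
-- stated objective: alternative
-- what changed: Replaces the materialised 'active' list plus four separate passes (len and three generator scans) by one fused pass that tallies statuses of active loans into a dict, reading the three buckets afterwards.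
import Mathlib
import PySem

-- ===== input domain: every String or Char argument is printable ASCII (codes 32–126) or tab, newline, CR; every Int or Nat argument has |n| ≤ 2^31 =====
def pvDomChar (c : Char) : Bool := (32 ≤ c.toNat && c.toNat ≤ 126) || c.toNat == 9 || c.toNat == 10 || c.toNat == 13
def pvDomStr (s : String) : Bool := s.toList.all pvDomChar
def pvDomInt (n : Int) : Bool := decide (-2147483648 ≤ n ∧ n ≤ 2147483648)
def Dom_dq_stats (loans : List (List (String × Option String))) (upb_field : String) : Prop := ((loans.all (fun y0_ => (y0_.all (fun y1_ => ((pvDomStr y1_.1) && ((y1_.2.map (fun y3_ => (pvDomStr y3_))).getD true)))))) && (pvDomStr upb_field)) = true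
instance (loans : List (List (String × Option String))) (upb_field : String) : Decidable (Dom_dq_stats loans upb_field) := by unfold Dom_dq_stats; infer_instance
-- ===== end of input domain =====

-- B replaces A's materialised active list and four separate counting passes by one fused tallying pass over loans (same return value; same asymptotic cost).

-- Python ln.get(k) with default None on a str → Optional[str] dict (first match; missing key ↦ none)
def pyget (d : List (String × Option String)) (k : String) : Option String :=
  ((d.find? (fun p => p.1 == k)).map Prod.snd).join

-- ===== PORT A =====
def dq_stats (loans : List (List (String × Option String))) (upb_field : String) : Int × Int × Int × Int × Int :=
  let active := loans.filter (fun ln => (pyget ln upb_field).isSome)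
  let n : Int := active.length
  let sf := if upb_field == "upb_dec" then "status_dec" else "status_jan"
  let s30 : Int := active.foldl (fun acc ln => if pyget ln sf == some "30 DPD" then acc + 1 else acc) 0
  let s60 : Int := active.foldl (fun acc ln => if pyget ln sf == some "60 DPD" then acc + 1 else acc) 0
  let s90 : Int := active.foldl (fun acc ln => if pyget ln sf == some "90+ DPD" then acc + 1 else acc) 0
  let scur := n - s30 - s60 - s90
  (n, scur, s30, s60, s90)

-- ===== PORT B =====
def dq_stats_alt (loans : List (List (String × Option String))) (upb_field : String) : Int × Int × Int × Int × Int :=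
  let sf := if upb_field == "upb_dec" then "status_dec" else "status_jan"
  let st := loans.foldl
    (fun (acc : Int × PySem.Dict (Option String) Int) ln =>
      match pyget ln upb_field with
      | none => acc
      | some _ => (acc.1 + 1, acc.2.modify (pyget ln sf) 0 (· + 1)))
    ((0 : Int), PySem.Dict.empty)
  let n := st.1
  let s30 := st.2.getD (some "30 DPD") 0
  let s60 := st.2.getD (some "60 DPD") 0
  let s90 := st.2.getD (some "90+ DPD") 0
  (n, n - s30 - s60 - s90, s30, s60, s90)

-- ===== PRECONDITION & SPEC =====
def Spec_dq_stats (loans : List (List (String × Option String))) (upb_field : String) (out : Int × Int × Int × Int × Int) : Prop := out = dq_stats_alt loans upb_field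
instance (loans : List (List (String × Option String))) (upb_field : String) (out : Int × Int × Int × Int × Int) : Decidable (Spec_dq_stats loans upb_field out) := by unfold Spec_dq_stats; infer_instance

-- ===== CLAIM (what is proved, stated in full; the proofs are below) =====
def Claim_equal_dq_stats : Prop := ∀ (loans : List (List (String × Option String))) (upb_field : String), Dom_dq_stats loans upb_field → Spec_dq_stats loans upb_field (dq_stats loans upb_field)

-- ===== LEMMAS AND PROOFS =====

-- A's 'sum(1 for … if p)' fold counts the matching elements.
theorem foldl_count_if {α : Type} (p : α → Bool) (l : List α) (c : Int) :
    l.foldl (fun acc x => if p x then acc + 1 else acc) c = c + (l.countP p : Int) := by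
  induction l generalizing c with
  | nil => simp
  | cons a t ih =>
    simp only [List.foldl_cons, List.countP_cons, ih]
    by_cases h : p a = true
    · simp [h]; ring
    · simp [h]

-- invariant of B's single fused pass
theorem foldB_spec (sf uf : String) (loans : List (List (String × Option String)))
    (n0 : Int) (t : PySem.Dict (Option String) Int) :
    (loans.foldl
      (fun (acc : Int × PySem.Dict (Option String) Int) ln =>
        match pyget ln uf with
        | none => acc
        | some _ => (acc.1 + 1, acc.2.modify (pyget ln sf) 0 (· + 1)))
      (n0, t)).1
      = n0 + ((loans.filter (fun ln => (pyget ln uf).isSome)).length : Int)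
    ∧ ∀ k, (loans.foldl
      (fun (acc : Int × PySem.Dict (Option String) Int) ln =>
        match pyget ln uf with
        | none => acc
        | some _ => (acc.1 + 1, acc.2.modify (pyget ln sf) 0 (· + 1)))
      (n0, t)).2.getD k 0
      = t.getD k 0 + (((loans.filter (fun ln => (pyget ln uf).isSome)).countP (fun ln => pyget ln sf == k)) : Int) := by
  induction loans generalizing n0 t with
  | nil => simp
  | cons ln rest ih =>
    cases hu : pyget ln uf with
    | none =>
      simpa [List.foldl_cons, List.filter_cons, hu] using ih n0 t
    | some v =>
      obtain ⟨ih1, ih2⟩ := ih (n0 + 1) (t.modify (pyget ln sf) 0 (· + 1))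
      constructor
      · simp only [List.foldl_cons, hu, ih1, List.filter_cons, Option.isSome_some]
        simp; push_cast; ring
      · intro k
        have h2 := ih2 k
        simp only [List.foldl_cons, hu] at h2 ⊢
        rw [h2, PySem.Dict.getD_modify]
        simp only [List.filter_cons, hu, Option.isSome_some]
        by_cases hk : k = pyget ln sf
        · subst hk
          simp
          push_cast
          ring
        · have hb : (pyget ln sf == k) = false := by
            simp only [beq_eq_false_iff_ne, ne_eq]
            exact fun h => hk h.symm
          simp [hk, hb]

-- ===== VERDICT (by name: the statement is the Claim_ definition above) =====
theorem dq_stats_spec : Claim_equal_dq_stats := by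
  intro loans upb_field _
  show dq_stats loans upb_field = dq_stats_alt loans upb_field
  unfold dq_stats dq_stats_alt
  set sf := if upb_field == "upb_dec" then "status_dec" else "status_jan" with hsf
  obtain ⟨h1, h2⟩ := foldB_spec sf upb_field loans 0 PySem.Dict.empty
  simp only [h1, h2, foldl_count_if, PySem.Dict.getD_empty, zero_add]
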